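-- pv_equiv track=rewrite | github.com/kevinngx/23T1-COMP9021-Principles-of-Programming | Week 03/Quiz 3/quiz_3_kevinngx_v2.py | get_initial_position
-- ===== SOURCE A (Python) =====
-- position_shift = {'0': 0, '1': -1, '2': 1}
--
-- def get_initial_position(directions):
--     position = 0
--     min_position = 0
--
--     for direction in directions:
--         position += position_shift[direction]
--         min_position = min(position, min_position)
--
--     if min_position < 0:
--         return abs(min_position)
--     else:
--         return 0
-- ===== SOURCE B (Python) =====
-- position_shift = {'0': 0, '1': -1, '2': 1}
--
-- def get_initial_position(directions):
--     # Backwards greedy: walk the path right-to-left, maintaining the smallest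
--     # starting position that keeps the remaining suffix non-negative.
--     # Before a step of shift s, we need start >= 0 and start + s >= required(suffix),
--     # hence required = max(0, required - s). No positions or minima are computed.
--     required = 0
--     for d in reversed(directions):
--         required = max(0, required - position_shift[d])
--     return required
-- ===== Notes on version B (the rewrite author's own statement) =====
-- stated objective: alternative
-- what changed: Instead of A's forward scan tracking the running position and its minimum and negating it, B walks the string right-to-left with the backwards-greedy recurrence required = max(0, required - shift(d)), computing the needed starting offset directly without ever computing positions or a minimum.
import Mathlib
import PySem

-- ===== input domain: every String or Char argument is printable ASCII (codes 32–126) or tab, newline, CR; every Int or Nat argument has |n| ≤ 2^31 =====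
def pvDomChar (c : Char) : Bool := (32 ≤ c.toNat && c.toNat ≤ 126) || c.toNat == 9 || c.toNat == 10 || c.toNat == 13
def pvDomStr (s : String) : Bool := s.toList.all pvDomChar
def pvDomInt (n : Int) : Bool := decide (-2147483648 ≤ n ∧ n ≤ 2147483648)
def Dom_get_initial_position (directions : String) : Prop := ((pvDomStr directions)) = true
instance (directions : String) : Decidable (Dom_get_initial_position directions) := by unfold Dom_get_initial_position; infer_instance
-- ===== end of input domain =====

-- B replaces A's forward min-of-positions scan by a backwards greedy right-to-left pass
-- computing the required starting offset directly (alternative decomposition, same cost).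

-- ===== PORT A =====
def positionShift : PySem.Dict String Int := PySem.Dict.ofList [("0", 0), ("1", -1), ("2", 1)]

-- position_shift[direction]: KeyError (get? = none) is excluded by Pre_; getD 0 stands for the looked-up value.
def get_initial_position (directions : String) : Int :=
  let st := directions.toList.foldl
    (fun (st : Int × Int) direction =>
      let position := st.1 + (positionShift.get? (String.ofList [direction])).getD 0
      (position, min position st.2))
    (0, 0)
  if st.2 < 0 then |st.2| else 0

-- ===== PORT B =====
def get_initial_position_alt (directions : String) : Int :=
  directions.toList.reverse.foldl
    (fun (required : Int) d =>
      max 0 (required - (positionShift.get? (String.ofList [d])).getD 0))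
    0

-- ===== PRECONDITION & SPEC =====
-- Pre_ excludes exactly the inputs on which Python A raises KeyError: characters other than '0','1','2'.
def Pre_get_initial_position (directions : String) : Prop :=
  directions.toList.all (fun c => c == '0' || c == '1' || c == '2') = true
instance (directions : String) : Decidable (Pre_get_initial_position directions) := by
  unfold Pre_get_initial_position; infer_instance

def pvWitness_get_initial_position : String := "21"

def Spec_get_initial_position (directions : String) (out : Int) : Prop := out = get_initial_position_alt directions
instance (directions : String) (out : Int) : Decidable (Spec_get_initial_position directions out) := by unfold Spec_get_initial_position; infer_instance

-- ===== CLAIM (what is proved, stated in full; the proofs are below) =====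
def Claim_equal_get_initial_position : Prop := ∀ (directions : String), Dom_get_initial_position directions → Pre_get_initial_position directions → Spec_get_initial_position directions (get_initial_position directions)

-- ===== LEMMAS AND PROOFS =====

-- the shared per-character shift value
def pvShift (c : Char) : Int := (positionShift.get? (String.ofList [c])).getD 0

-- A's fold and the value of its running minimum from the initial state
def pvF (l : List Char) (st : Int × Int) : Int × Int :=
  l.foldl (fun st d => (st.1 + pvShift d, min (st.1 + pvShift d) st.2)) st

def pvK (l : List Char) : Int := (pvF l (0, 0)).2

-- B's backwards recurrence as a foldr
def pvG (l : List Char) : Int := l.foldr (fun d req => max 0 (req - pvShift d)) 0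

-- A's running minimum from a general state (p, m) with m ≤ p is min m (p + pvK l).
theorem pvF_snd (l : List Char) :
    ∀ p m : Int, m ≤ p → (pvF l (p, m)).2 = min m (p + pvK l) := by
  induction l with
  | nil => intro p m h; simp [pvF, pvK]; omega
  | cons c rest ih =>
    intro p m h
    have h1 : (pvF (c :: rest) (p, m)).2
        = (pvF rest (p + pvShift c, min (p + pvShift c) m)).2 := by
      simp [pvF]
    have h2 : pvK (c :: rest) = (pvF rest (pvShift c, min (pvShift c) 0)).2 := by
      simp [pvK, pvF]
    rw [h1, h2, ih (p + pvShift c) (min (p + pvShift c) m) (min_le_left _ _),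
        ih (pvShift c) (min (pvShift c) 0) (min_le_left _ _)]
    omega

-- B's backwards recurrence equals the clamped negation of A's running minimum.
theorem pvG_eq (l : List Char) : pvG l = max 0 (-(pvK l)) := by
  induction l with
  | nil => simp [pvG, pvK, pvF]
  | cons c rest ih =>
    have h2 : pvK (c :: rest) = (pvF rest (pvShift c, min (pvShift c) 0)).2 := by
      simp [pvK, pvF]
    have h3 := pvF_snd rest (pvShift c) (min (pvShift c) 0) (min_le_left _ _)
    have h4 : pvG (c :: rest) = max 0 (pvG rest - pvShift c) := by simp [pvG]
    rw [h4, ih, h2, h3]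
    omega

theorem get_initial_position_eq (directions : String) :
    get_initial_position directions = get_initial_position_alt directions := by
  unfold get_initial_position get_initial_position_alt
  show (if (pvF directions.toList (0, 0)).2 < 0 then |(pvF directions.toList (0, 0)).2| else 0)
      = directions.toList.reverse.foldl (fun required d => max 0 (required - pvShift d)) 0
  rw [List.foldl_reverse]
  have hG : directions.toList.foldr (fun d required => max 0 (required - pvShift d)) 0
      = max 0 (-(pvK directions.toList)) := pvG_eq directions.toList
  rw [hG]
  have : pvK directions.toList = (pvF directions.toList (0, 0)).2 := rfl
  rw [← this]
  rcases lt_or_ge (pvK directions.toList) 0 with hlt | hge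
  · rw [if_pos hlt, abs_of_neg hlt]; omega
  · rw [if_neg (not_lt.mpr hge)]; omega

-- ===== VERDICT (by name: the statement is the Claim_ definition above) =====
theorem get_initial_position_spec : Claim_equal_get_initial_position := by
  intro directions _ _
  exact get_initial_position_eq directions
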